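-- pv_equiv track=rewrite | github.com/kdkaanev/BI | backend/fastapi_app/routers/charts.py | choose_main_metric
-- ===== SOURCE A (Python) =====
-- def choose_main_metric(numeric_columns):
--     PRIORITY_NAMES = [
--         "revenue",
--         "sales",
--         "amount",
--         "total",
--         "price",
--         "cost",
--         "value",
--     ]
--
--     for name in PRIORITY_NAMES:
--         for col in numeric_columns:
--             if name in col.lower():
--                 return col
--
--     return numeric_columns[0] if numeric_columns else None
-- ===== SOURCE B (Python) =====
-- def choose_main_metric(numeric_columns):
--     PRIORITY_NAMES = [
--         "revenue",
--         "sales",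
--         "amount",
--         "total",
--         "price",
--         "cost",
--         "value",
--     ]
--
--     best_rank = len(PRIORITY_NAMES) + 1  # worse than any possible rank
--     best_col = None
--     for col in numeric_columns:
--         low = col.lower()
--         rank = len(PRIORITY_NAMES)  # sentinel: no keyword matches
--         for i, name in enumerate(PRIORITY_NAMES):
--             if name in low:
--                 rank = i
--                 break
--         if rank < best_rank:
--             best_rank = rank
--             best_col = col
--     return best_col
-- ===== Notes on version B (the rewrite author's own statement) =====
-- stated objective: alternative
-- what changed: Replaces the priority-keyword-outer nested scan (restarting over all columns for each keyword) with a single pass over the columns that computes each column's priority rank (first matching keyword index, len as sentinel) and keeps the first column with the strictly smallest rank.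
import Mathlib
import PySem

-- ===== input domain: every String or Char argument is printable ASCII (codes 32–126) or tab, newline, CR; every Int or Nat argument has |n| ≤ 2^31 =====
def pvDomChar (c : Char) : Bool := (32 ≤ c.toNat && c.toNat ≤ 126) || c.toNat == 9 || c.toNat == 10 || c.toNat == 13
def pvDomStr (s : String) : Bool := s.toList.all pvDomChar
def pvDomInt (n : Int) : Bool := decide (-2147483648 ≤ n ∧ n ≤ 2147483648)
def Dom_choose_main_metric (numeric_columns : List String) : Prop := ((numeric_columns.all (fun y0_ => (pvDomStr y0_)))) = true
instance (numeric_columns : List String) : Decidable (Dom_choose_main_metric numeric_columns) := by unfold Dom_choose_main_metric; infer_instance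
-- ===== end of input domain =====

-- B replaces A's keyword-outer nested scan by one pass over the columns with a computed
-- per-column priority rank and a first-argmin accumulator (objective: alternative decomposition).

-- the PRIORITY_NAMES constant shared by both programs
def pvPriority : List String :=
  ["revenue", "sales", "amount", "total", "price", "cost", "value"]

-- ===== PORT A =====
-- inner loop: 'for col in numeric_columns: if name in col.lower(): return col'
def pvFindCol (name : String) : List String → Option String
  | [] => none
  | c :: cs => if PySem.Str.isIn name (PySem.Str.lower c) then some c else pvFindCol name cs

-- outer loop over PRIORITY_NAMES, then 'numeric_columns[0] if numeric_columns else None'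
def pvChooseA : List String → List String → Option String
  | [], cols => cols.head?
  | n :: ns, cols =>
    match pvFindCol n cols with
    | some c => some c
    | none => pvChooseA ns cols

def choose_main_metric (numeric_columns : List String) : Option String :=
  pvChooseA pvPriority numeric_columns

-- ===== PORT B =====
-- inner loop of Source B: rank = first index i with PRIORITY_NAMES[i] in low, else len(PRIORITY_NAMES)
def pvRank (low : String) : List String → Nat
  | [] => 0
  | n :: ns => if PySem.Str.isIn n low then 0 else 1 + pvRank low ns

-- loop body of Source B: keep (best_rank, best_col), update on strictly smaller rank
def pvStepB (st : Nat × Option String) (col : String) : Nat × Option String :=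
  let rank := pvRank (PySem.Str.lower col) pvPriority
  if rank < st.1 then (rank, some col) else st

def choose_main_metric_alt (numeric_columns : List String) : Option String :=
  (numeric_columns.foldl pvStepB (pvPriority.length + 1, none)).2

-- ===== PRECONDITION & SPEC =====
def Spec_choose_main_metric (numeric_columns : List String) (out : Option String) : Prop := out = choose_main_metric_alt numeric_columns
instance (numeric_columns : List String) (out : Option String) : Decidable (Spec_choose_main_metric numeric_columns out) := by unfold Spec_choose_main_metric; infer_instance

-- ===== CLAIM (what is proved, stated in full; the proofs are below) =====
def Claim_equal_choose_main_metric : Prop := ∀ (numeric_columns : List String), Dom_choose_main_metric numeric_columns → Spec_choose_main_metric numeric_columns (choose_main_metric numeric_columns)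

-- ===== LEMMAS AND PROOFS =====

-- B's step with an arbitrary priority list (for the induction over PRIORITY_NAMES)
def pvStepG (names : List String) (st : Nat × Option String) (col : String) : Nat × Option String :=
  let rank := pvRank (PySem.Str.lower col) names
  if rank < st.1 then (rank, some col) else st

theorem pvStepG_priority : pvStepG pvPriority = pvStepB := rfl

-- once the best rank is 0, nothing changes
theorem foldG_zero (names : List String) (cols : List String) (o : Option String) :
    cols.foldl (pvStepG names) (0, o) = (0, o) := by
  induction cols with
  | nil => rfl
  | cons c cs ih => simp [List.foldl, pvStepG, ih]

-- if some column matches name n, the fold (started with best_rank ≥ 1) ends at the first such column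
theorem foldG_found (n : String) (ns : List String) (cols : List String) (c : String)
    (hfind : pvFindCol n cols = some c) :
    ∀ k o, 1 ≤ k → (cols.foldl (pvStepG (n :: ns)) (k, o)).2 = some c := by
  induction cols with
  | nil => simp [pvFindCol] at hfind
  | cons c0 cs ih =>
    intro k o hk
    by_cases h : PySem.Chars.isIn n.toList (PySem.Chars.lower c0.toList) = true
    · simp [pvFindCol, h] at hfind
      subst hfind
      simp [List.foldl, pvStepG, pvRank, h, Nat.lt_of_lt_of_le Nat.zero_lt_one hk, foldG_zero]
    · simp [pvFindCol, h] at hfind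
      simp only [List.foldl]
      have hstep : pvStepG (n :: ns) (k, o) c0 =
          if 1 + pvRank (PySem.Str.lower c0) ns < k
          then (1 + pvRank (PySem.Str.lower c0) ns, some c0) else (k, o) := by
        simp [pvStepG, pvRank, h]
      rw [hstep]
      split
      · exact ih hfind _ _ (Nat.le_add_right 1 _)
      · exact ih hfind _ _ hk

-- if no column matches name n, dropping n from the priority list shifts every rank and
-- the threshold by one and leaves the chosen column unchanged
theorem foldG_shift (n : String) (ns : List String) (cols : List String)
    (hnone : pvFindCol n cols = none) :
    ∀ st : Nat × Option String,
      cols.foldl (pvStepG (n :: ns)) (st.1 + 1, st.2) =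
        ((cols.foldl (pvStepG ns) st).1 + 1, (cols.foldl (pvStepG ns) st).2) := by
  induction cols with
  | nil => intro st; rfl
  | cons c0 cs ih =>
    intro st
    by_cases h : PySem.Chars.isIn n.toList (PySem.Chars.lower c0.toList) = true
    · simp [pvFindCol, h] at hnone
    · simp [pvFindCol, h] at hnone
      simp only [List.foldl]
      have h1 : pvStepG (n :: ns) (st.1 + 1, st.2) c0 =
          if 1 + pvRank (PySem.Str.lower c0) ns < st.1 + 1
          then (1 + pvRank (PySem.Str.lower c0) ns, some c0) else (st.1 + 1, st.2) := by
        simp [pvStepG, pvRank, h]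
      have h2 : pvStepG ns st c0 =
          if pvRank (PySem.Str.lower c0) ns < st.1
          then (pvRank (PySem.Str.lower c0) ns, some c0) else st := by
        simp [pvStepG]
      rw [h1, h2]
      by_cases hlt : pvRank (PySem.Str.lower c0) ns < st.1
      · have : 1 + pvRank (PySem.Str.lower c0) ns < st.1 + 1 := by omega
        simp only [hlt, if_pos this]
        have := ih hnone (pvRank (PySem.Str.lower c0) ns, some c0)
        simpa [Nat.add_comm] using this
      · have : ¬ (1 + pvRank (PySem.Str.lower c0) ns < st.1 + 1) := by omega
        simp only [if_neg this, if_neg hlt]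
        exact ih hnone st

-- main lemma: A's nested scan equals B's single-pass argmin, for any priority list
theorem chooseA_eq_fold (names : List String) (cols : List String) :
    ∀ k, names.length < k →
      pvChooseA names cols = (cols.foldl (pvStepG names) (k, none)).2 := by
  induction names with
  | nil =>
    intro k hk
    cases cols with
    | nil => rfl
    | cons c cs =>
      have h1 : pvStepG [] (k, none) c = (0, some c) := by
        simp only [pvStepG, pvRank]
        rw [if_pos (by simpa using hk)]
      simp [pvChooseA, List.foldl, h1, foldG_zero]
  | cons n ns ih =>
    intro k hk
    cases hf : pvFindCol n cols with
    | some c =>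
      rw [show pvChooseA (n :: ns) cols = some c by simp [pvChooseA, hf]]
      exact (foldG_found n ns cols c hf k none (by simp at hk; omega)).symm
    | none =>
      rw [show pvChooseA (n :: ns) cols = pvChooseA ns cols by simp [pvChooseA, hf]]
      obtain ⟨k', rfl⟩ : ∃ k', k = k' + 1 := ⟨k - 1, by simp at hk; omega⟩
      rw [show ((k' : Nat) + 1, (none : Option String)) =
            (((k', (none : Option String)) : Nat × Option String).1 + 1,
             ((k', (none : Option String)) : Nat × Option String).2) from rfl]
      rw [foldG_shift n ns cols hf]
      exact ih k' (by simp at hk; omega)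

-- ===== VERDICT (by name: the statement is the Claim_ definition above) =====
theorem choose_main_metric_spec : Claim_equal_choose_main_metric := by
  intro cols _
  unfold Spec_choose_main_metric choose_main_metric choose_main_metric_alt
  rw [← pvStepG_priority]
  exact chooseA_eq_fold pvPriority cols (pvPriority.length + 1) (Nat.lt_succ_self _)
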